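-- pv_equiv track=rewrite | github.com/rixwoodling/data-parsers | tast_parser.py | sort_results_by_header_and_last_unique_component
-- ===== SOURCE A (Python) =====
-- def sort_results_by_header_and_last_unique_component(results, headers):
--     sorted_results = []
--
--     # Loop through each header in the header list
--     for header in headers:
--         # Filter results that match the current header
--         header_results = [result for result in results if f"/{header}/" in result]
--
--         if header_results:
--             # Split each path into components (using '/' as the delimiter)
--             split_results = [result.split('/') for result in header_results]
--
--             # Determine the length of the shortest path
--             max_depth = min(len(path) for path in split_results)
--
--             # If there's only one result for this header, append it directly
--             if len(header_results) == 1: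
--                 sorted_results.extend(header_results)
--                 continue
--
--             # Start comparing components from the end, going backwards
--             for i in range(1, max_depth + 1):
--                 # Get the i-th component from the end for all paths (e.g., run1, run2)
--                 components = [path[-i] for path in split_results]
--
--                 # Check if all components are the same
--                 if len(set(components)) > 1:
--                     # Found the first non-unique component, now sort by this component
--                     sorted_header_results = sorted(header_results, key=lambda x: x.split('/')[-i])
--                     sorted_results.extend(sorted_header_results)  # Add sorted header-specific results to the overall list
--                     break
--             else:
--                 # If all components are the same (e.g., all run1), append them directly
--                 sorted_results.extend(header_results)
--         else:
--             # If there are no header results, just skip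
--             continue
--
--     return sorted_results
-- ===== SOURCE B (Python) =====
-- def _cp(a, b):
--     """Length of the longest common prefix of two lists."""
--     n = 0
--     for x, y in zip(a, b):
--         if x != y:
--             break
--         n += 1
--     return n
--
--
-- def sort_results_by_header_and_last_unique_component(results, headers):
--     out = []
--     for header in headers:
--         token = "/" + header + "/"
--         group = [r for r in results if token in r]
--         if len(group) <= 1:
--             out += group
--             continue
--         # Reverse each path's components once; the first position (from the
--         # end of the path) where the group disagrees is the length of the
--         # longest common prefix of the reversed component lists.
--         revs = [r.split('/')[::-1] for r in group]
--         k = len(revs[0])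
--         for rv in revs[1:]:
--             k = min(k, _cp(revs[0], rv))
--         depth = min(len(rv) for rv in revs)
--         if k >= depth:
--             out += group
--         else:
--             out += sorted(group, key=lambda r: r.split('/')[::-1][k])
--     return out
-- ===== Notes on version B (the rewrite author's own statement) =====
-- stated objective: alternative
-- what changed: Instead of A's backwards range scan that rebuilds a set of the i-th-from-last components at every depth until one differs, B reverses each path's component list once and computes the discriminating depth directly as the minimum common-prefix length of the reversed lists against the first path, then sorts the group by that single component.
import Mathlib
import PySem

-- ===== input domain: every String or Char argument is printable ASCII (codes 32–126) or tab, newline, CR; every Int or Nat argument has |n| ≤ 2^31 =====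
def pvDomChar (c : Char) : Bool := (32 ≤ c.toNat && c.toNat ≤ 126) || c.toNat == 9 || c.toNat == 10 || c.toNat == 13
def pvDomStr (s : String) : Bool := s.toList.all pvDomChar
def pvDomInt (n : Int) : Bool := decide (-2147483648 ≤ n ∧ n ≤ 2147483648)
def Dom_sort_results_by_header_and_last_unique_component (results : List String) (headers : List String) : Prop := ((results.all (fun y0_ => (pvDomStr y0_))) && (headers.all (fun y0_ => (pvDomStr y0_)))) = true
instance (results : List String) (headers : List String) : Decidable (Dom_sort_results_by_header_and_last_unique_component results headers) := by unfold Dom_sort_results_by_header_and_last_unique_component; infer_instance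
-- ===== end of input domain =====

-- B replaces A's backwards range scan (rebuilding a set of components at every
-- depth) by reversing each path's components once and taking the minimum
-- common-prefix length against the first path; same return value, different
-- decomposition (objective: alternative).

-- shared primitive wrapper: Python's r.split('/') (sep is non-empty, so split? is some)
def pvSplitSlash (s : String) : List String := (PySem.Str.split? s "/").getD []

-- ===== PORT A =====
-- the `for i in range(1, max_depth+1): … break / else` loop of A
def pvLoopA (split_results : List (List String)) (header_results : List String) : List Int → Option (List String)
  | [] => none
  | i :: rest =>
    let components := split_results.map (fun path => PySem.List.pyGetD path (-i) "")
    if 1 < (PySem.Set.ofList components).length then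
      some (PySem.List.sorted header_results (fun x => PySem.List.pyGetD (pvSplitSlash x) (-i) ""))
    else pvLoopA split_results header_results rest

-- the body of A's `for header in headers` loop
def pvStepA (results : List String) (sorted_results : List String) (header : String) : List String :=
    let header_results := results.filter (fun result => PySem.Str.isIn ("/" ++ header ++ "/") result)
    if header_results ≠ [] then
      let split_results := header_results.map (fun result => pvSplitSlash result)
      let max_depth : Int := (PySem.List.min? (split_results.map (fun path => (path.length : Int))) (fun x => x)).getD 0
      if header_results.length = 1 then sorted_results ++ header_results
      else
        match pvLoopA split_results header_results (PySem.List.pyRange 1 (max_depth + 1)) with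
        | some s => sorted_results ++ s
        | none => sorted_results ++ header_results
    else sorted_results

def sort_results_by_header_and_last_unique_component (results : List String) (headers : List String) : List String :=
  headers.foldl (pvStepA results) []

-- ===== PORT B =====
-- the `_cp` helper of Source B: longest common prefix length of two lists
def pvCpLen : List String → List String → Nat
  | x :: xs, y :: ys => if x ≠ y then 0 else pvCpLen xs ys + 1
  | _, _ => 0

-- the body of B's `for header in headers` loop
def pvStepB (results : List String) (out : List String) (header : String) : List String :=
    let token := "/" ++ header ++ "/"
    let group := results.filter (fun r => PySem.Str.isIn token r)
    if group.length ≤ 1 then out ++ group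
    else
      -- r.split('/')[::-1] is reverse (PySem.List.slice?_none_none_neg_one)
      let revs := group.map (fun r => (pvSplitSlash r).reverse)
      let k := (revs.drop 1).foldl (fun n rv => min n (pvCpLen (revs.headD []) rv)) (revs.headD []).length
      let depth : Int := (PySem.List.min? (revs.map (fun rv => (rv.length : Int))) (fun x => x)).getD 0
      if depth ≤ (k : Int) then out ++ group
      else out ++ PySem.List.sorted group (fun r => PySem.List.pyGetD (pvSplitSlash r).reverse (k : Int) "")

def sort_results_by_header_and_last_unique_component_alt (results : List String) (headers : List String) : List String :=
  headers.foldl (pvStepB results) []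

-- ===== PRECONDITION & SPEC =====
def Spec_sort_results_by_header_and_last_unique_component (results : List String) (headers : List String) (out : List String) : Prop := out = sort_results_by_header_and_last_unique_component_alt results headers
instance (results : List String) (headers : List String) (out : List String) : Decidable (Spec_sort_results_by_header_and_last_unique_component results headers out) := by unfold Spec_sort_results_by_header_and_last_unique_component; infer_instance

-- ===== CLAIM (what is proved, stated in full; the proofs are below) =====
def Claim_equal_sort_results_by_header_and_last_unique_component : Prop := ∀ (results : List String) (headers : List String), Dom_sort_results_by_header_and_last_unique_component results headers → Spec_sort_results_by_header_and_last_unique_component results headers (sort_results_by_header_and_last_unique_component results headers)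

-- ===== LEMMAS AND PROOFS =====

lemma pv_two_mem_one_lt_length {α : Type} {l : List α} {a b : α}
    (ha : a ∈ l) (hb : b ∈ l) (hne : a ≠ b) : 1 < l.length := by
  match l, ha with
  | [x], ha =>
    simp_all
  | x :: y :: t, _ =>
    simp [List.length]

lemma pv_set_const_not_lt (xs : List String) (c : String)
    (h : ∀ x ∈ xs, x = c) : ¬ 1 < (PySem.Set.ofList xs).length := by
  intro hlt
  have hnd := PySem.Set.nodup_ofList xs
  match hm : PySem.Set.ofList xs, hnd, hlt with
  | x :: y :: t, hnd, _ =>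
    have hx : x ∈ PySem.Set.ofList xs := by rw [hm]; simp
    have hy : y ∈ PySem.Set.ofList xs := by rw [hm]; simp
    rw [PySem.Set.mem_ofList] at hx hy
    have : x ≠ y := fun he =>
      (List.nodup_cons.1 hnd).1 (he ▸ List.mem_cons_self)
    exact this ((h _ hx).trans (h _ hy).symm)

lemma pv_set_two_lt (xs : List String) {a b : String}
    (ha : a ∈ xs) (hb : b ∈ xs) (hne : a ≠ b) : 1 < (PySem.Set.ofList xs).length :=
  pv_two_mem_one_lt_length ((PySem.Set.mem_ofList xs a).2 ha)
    ((PySem.Set.mem_ofList xs b).2 hb) hne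

lemma pvCpLen_eq (a b : List String) (j : Nat) (hj : j < pvCpLen a b) :
    a[j]? = b[j]? := by
  induction a generalizing b j with
  | nil => simp [pvCpLen] at hj
  | cons x xs ih =>
    cases b with
    | nil => simp [pvCpLen] at hj
    | cons y ys =>
      simp only [pvCpLen] at hj
      split at hj
      · omega
      · rename_i hxy
        simp only [ne_eq, not_not] at hxy
        cases j with
        | zero => simp [hxy]
        | succ j => simpa using ih ys j (by omega)

lemma pvCpLen_ne (a b : List String)
    (h1 : pvCpLen a b < a.length) (h2 : pvCpLen a b < b.length) :
    a[pvCpLen a b]? ≠ b[pvCpLen a b]? := by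
  induction a generalizing b with
  | nil => simp at h1
  | cons x xs ih =>
    cases b with
    | nil => simp at h2
    | cons y ys =>
      simp only [pvCpLen] at *
      split at h1
      · rename_i hxy
        simp only [if_pos hxy]
        simpa using hxy
      · rename_i hxy
        simp only [ne_eq, not_not] at hxy
        rw [if_neg (by simp [hxy])] at h2 ⊢
        have := ih ys (by simp at h1 ⊢; omega) (by simp at h2 ⊢; omega)
        simpa using this

lemma pv_foldl_min_spec (f : List String → Nat) (l : List (List String)) (n0 : Nat) :
    (l.foldl (fun n x => min n (f x)) n0 ≤ n0) ∧
    (∀ x ∈ l, l.foldl (fun n x => min n (f x)) n0 ≤ f x) ∧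
    (l.foldl (fun n x => min n (f x)) n0 = n0 ∨
      ∃ x ∈ l, f x = l.foldl (fun n x => min n (f x)) n0) := by
  induction l generalizing n0 with
  | nil => simp
  | cons a t ih =>
    obtain ⟨h1, h2, h3⟩ := ih (min n0 (f a))
    refine ⟨by simpa using le_trans h1 (by omega), ?_, ?_⟩
    · intro x hx
      rcases List.mem_cons.1 hx with rfl | hx
      · simp only [List.foldl_cons]; exact le_trans h1 (by omega)
      · simpa using h2 x hx
    · rcases h3 with h3 | ⟨x, hx, hfx⟩
      · by_cases hc : f a < n0
        · right; exact ⟨a, by simp, by simp only [List.foldl_cons]; omega⟩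
        · left; simp only [List.foldl_cons]; omega
      · right; exact ⟨x, by simp [hx], by simpa using hfx⟩

-- l[-(n+1)] = l[::-1][n]  (both sides defaulting outside range)
lemma pv_pyGetD_neg_succ_reverse {α : Type} (l : List α) (n : Nat) (d : α) :
    PySem.List.pyGetD l (-((n : Int) + 1)) d = PySem.List.pyGetD l.reverse (n : Int) d := by
  simp only [PySem.List.pyGetD, PySem.List.pyGet?, PySem.List.pyIdx?, List.length_reverse]
  by_cases h : n + 1 ≤ l.length
  · rw [if_neg (by omega), if_pos (by omega), if_pos (by omega),
      if_pos (by omega)]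
    simp only [neg_neg, Int.toNat_natCast]
    have hn : n < l.length := by omega
    have h1 : ((n : Int) + 1).toNat = n + 1 := by omega
    rw [h1]
    show (l[l.length - (n + 1)]?).getD d = (l.reverse[n]?).getD d
    rw [List.getElem?_reverse hn]
    have h2 : l.length - (n + 1) = l.length - 1 - n := by omega
    rw [h2]
  · rw [if_neg (by omega), if_neg (by omega), if_pos (by omega),
      if_neg (by omega)]
    simp

lemma pv_min_len_facts (S : List (List String)) (hS : S ≠ []) :
    (∃ p ∈ S, (p.length : Int) = (PySem.List.min? (S.map (fun p => (p.length : Int))) (fun x => x)).getD 0) ∧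
    (∀ p ∈ S, (PySem.List.min? (S.map (fun p => (p.length : Int))) (fun x => x)).getD 0 ≤ (p.length : Int)) := by
  have hne : S.map (fun p => ((p.length : Int))) ≠ [] := by simpa using hS
  obtain ⟨m, hm⟩ : ∃ m, PySem.List.min? (S.map (fun p => (p.length : Int))) (fun x => x) = some m := by
    cases hmm : PySem.List.min? (S.map (fun p => (p.length : Int))) (fun x => x) with
    | none => exact absurd ((PySem.List.min?_eq_none_iff _ _).1 hmm) hne
    | some m => exact ⟨m, rfl⟩
  have hmem := PySem.List.min?_mem hm
  have hmin := PySem.List.min?_isMin hm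
  rw [hm]
  simp only [Option.getD_some]
  constructor
  · obtain ⟨p, hp, hpe⟩ := List.mem_map.1 hmem
    exact ⟨p, hp, hpe⟩
  · intro p hp
    exact hmin _ (List.mem_map.2 ⟨p, hp, rfl⟩)

-- behaviour of A's backwards loop, abstractly
lemma pvLoopA_spec (S : List (List String)) (g : List String) (hS : S ≠ []) (k dN : Nat)
    (hlen : ∀ p ∈ S, dN ≤ p.length)
    (hconst : ∀ j : Nat, j < k → j < dN → ∀ p ∈ S, ∀ q ∈ S, p.reverse[j]? = q.reverse[j]?)
    (hdiff : k < dN → ∃ p ∈ S, ∃ q ∈ S, p.reverse[k]? ≠ q.reverse[k]?) :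
    ∀ t m : Nat, m + t = dN → m ≤ k →
      pvLoopA S g (PySem.List.pyRange ((m : Int) + 1) ((dN : Int) + 1)) =
        (if dN ≤ k then none
         else some (PySem.List.sorted g (fun x => PySem.List.pyGetD (pvSplitSlash x) (-((k : Int) + 1)) ""))) := by
  intro t
  induction t with
  | zero =>
    intro m hm hk
    rw [PySem.List.pyRange_one_eq_nil (by omega)]
    rw [if_pos (by omega)]
    rfl
  | succ t ih =>
    intro m hm hk
    rw [PySem.List.pyRange_one_cons (by omega)]
    simp only [pvLoopA]
    have hmd : m < dN := by omega
    have hval : ∀ p ∈ S, PySem.List.pyGetD p (-((m : Int) + 1)) "" = p.reverse.getD m "" := by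
      intro p hp
      rw [pv_pyGetD_neg_succ_reverse, PySem.List.pyGetD_natCast]
    by_cases hmk : m < k
    · -- all components equal: take the else branch and recurse
      rw [if_neg ?_]
      · have : ((m : Int) + 1 + 1) = ((m + 1 : Nat) : Int) + 1 := by push_cast; ring
        rw [this]
        exact ih (m + 1) (by omega) (by omega)
      · obtain ⟨p0, hp0⟩ := List.exists_mem_of_ne_nil S hS
        apply pv_set_const_not_lt _ (p0.reverse.getD m "")
        intro x hx
        obtain ⟨p, hp, rfl⟩ := List.mem_map.1 hx
        rw [hval p hp]
        have h1 := hconst m hmk hmd p hp p0 hp0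
        have hpl : m < p.reverse.length := by simpa using lt_of_lt_of_le hmd (hlen p hp)
        have hp0l : m < p0.reverse.length := by simpa using lt_of_lt_of_le hmd (hlen p0 hp0)
        rw [List.getD_eq_getElem?_getD, List.getD_eq_getElem?_getD, h1]
    · -- m = k: the first differing depth; sort here
      have hmk' : m = k := by omega
      subst hmk'
      obtain ⟨p, hp, q, hq, hne⟩ := hdiff hmd
      rw [if_pos ?_]
      · rw [if_neg (by omega)]
      · apply pv_set_two_lt _ (List.mem_map.2 ⟨p, hp, rfl⟩) (List.mem_map.2 ⟨q, hq, rfl⟩)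
        rw [hval p hp, hval q hq]
        have hpl : m < p.reverse.length := by simpa using lt_of_lt_of_le hmd (hlen p hp)
        have hql : m < q.reverse.length := by simpa using lt_of_lt_of_le hmd (hlen q hq)
        rw [List.getD_eq_getElem?_getD, List.getD_eq_getElem?_getD]
        rw [List.getElem?_eq_getElem hpl, List.getElem?_eq_getElem hql] at hne ⊢
        simpa using fun h => hne (by simp [h])

-- one header's contribution is the same in both programs
lemma pv_step_eq (results : List String) (acc : List String) (header : String) :
    pvStepA results acc header = pvStepB results acc header := by
  simp only [pvStepA, pvStepB]
  cases hg : results.filter (fun result => PySem.Str.isIn ("/" ++ header ++ "/") result) with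
  | nil => simp
  | cons r0 tail =>
    cases tail with
    | nil => simp
    | cons r1 rest =>
      rw [if_pos (by simp : (r0 :: r1 :: rest : List String) ≠ [])]
      rw [if_neg (by simp : ¬(r0 :: r1 :: rest : List String).length = 1)]
      rw [if_neg (by simp : ¬(r0 :: r1 :: rest : List String).length ≤ 1)]
      set g : List String := r0 :: r1 :: rest with hgd
      set S : List (List String) := g.map (fun result => pvSplitSlash result) with hSd
      set R : List (List String) := g.map (fun r => (pvSplitSlash r).reverse) with hRd
      have hRS : R = S.map List.reverse := by rw [hRd, hSd, List.map_map]; rfl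
      have hS : S ≠ [] := by rw [hSd, hgd]; simp
      have hlenRS : R.map (fun rv => ((rv.length : Int))) = S.map (fun path => ((path.length : Int))) := by
        rw [hRS, List.map_map]; simp [Function.comp, List.length_reverse]
      set d : Int := (PySem.List.min? (S.map (fun path => ((path.length : Int)))) (fun x => x)).getD 0 with hdd
      have hdR : (PySem.List.min? (R.map (fun rv => ((rv.length : Int)))) (fun x => x)).getD 0 = d := by
        rw [hlenRS, ← hdd]
      obtain ⟨⟨pmin, hpmin, hpminlen⟩, hmin⟩ := pv_min_len_facts S hS
      have hd0 : 0 ≤ d := by rw [hdd, ← hpminlen]; positivity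
      set dN : Nat := d.toNat with hdN
      have hdcast : (dN : Int) = d := Int.toNat_of_nonneg hd0
      have hlenS : ∀ p ∈ S, dN ≤ p.length := by
        intro p hp
        have h := hmin p hp
        omega
      set R0 : List String := (pvSplitSlash r0).reverse with hR0
      have hR0head : R.headD [] = R0 := by rw [hRd, hgd]; rfl
      have hRcons : R = R0 :: (g.tail.map (fun r => (pvSplitSlash r).reverse)) := by
        rw [hRd, hgd]; rfl
      have hRdrop : R.drop 1 = g.tail.map (fun r => (pvSplitSlash r).reverse) := by
        rw [hRcons]; rfl
      have hsp0 : pvSplitSlash r0 ∈ S := by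
        rw [hSd, hgd]; exact List.mem_map.2 ⟨r0, by simp, rfl⟩
      have hR0len : dN ≤ R0.length := by
        rw [hR0]; simpa using hlenS _ hsp0
      rw [hR0head]
      set k : Nat := (R.drop 1).foldl (fun n rv => min n (pvCpLen R0 rv)) R0.length with hkd
      obtain ⟨hk0, hkmem, hkatt⟩ := pv_foldl_min_spec (pvCpLen R0) (R.drop 1) R0.length
      rw [← hkd] at hk0 hkmem hkatt
      have hcol : ∀ rv ∈ R, ∀ j : Nat, j < k → rv[j]? = R0[j]? := by
        intro rv hrv j hj
        rw [hRcons] at hrv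
        rcases List.mem_cons.1 hrv with rfl | hrv
        · rfl
        · rw [← hRdrop] at hrv
          exact (pvCpLen_eq R0 rv j (lt_of_lt_of_le hj (hkmem rv hrv))).symm
      have hconst : ∀ j : Nat, j < k → j < dN → ∀ p ∈ S, ∀ q ∈ S, p.reverse[j]? = q.reverse[j]? := by
        intro j hjk hjd p hp q hq
        have hpR : p.reverse ∈ R := by rw [hRS]; exact List.mem_map.2 ⟨p, hp, rfl⟩
        have hqR : q.reverse ∈ R := by rw [hRS]; exact List.mem_map.2 ⟨q, hq, rfl⟩
        rw [hcol _ hpR j hjk, hcol _ hqR j hjk]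
      have hdiff : k < dN → ∃ p ∈ S, ∃ q ∈ S, p.reverse[k]? ≠ q.reverse[k]? := by
        intro hkdN
        rcases hkatt with hkeq | ⟨rv, hrv, hcp⟩
        · omega
        · obtain ⟨r, hr, hrveq⟩ := List.mem_map.1 (hRdrop ▸ hrv)
          have hrg : r ∈ g := List.mem_of_mem_tail hr
          have hspr : pvSplitSlash r ∈ S := by
            rw [hSd]; exact List.mem_map.2 ⟨r, hrg, rfl⟩
          have hrvlen : dN ≤ rv.length := by
            rw [← hrveq]; simpa using hlenS _ hspr
          have hne := pvCpLen_ne R0 rv (by omega) (by omega)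
          rw [hcp] at hne
          refine ⟨pvSplitSlash r0, hsp0, pvSplitSlash r, hspr, ?_⟩
          rw [← hR0, hrveq]
          exact hne
      have hloop := pvLoopA_spec S g hS k dN hlenS hconst hdiff dN 0 (by omega) (by omega)
      have h01 : (((0 : Nat) : Int)) + 1 = 1 := by norm_num
      rw [h01, hdcast] at hloop
      rw [hloop, hdR]
      by_cases hdk : dN ≤ k
      · rw [if_pos hdk, if_pos (show d ≤ (k : Int) by omega)]
      · rw [if_neg hdk, if_neg (show ¬ d ≤ (k : Int) by omega)]
        have hkey : (fun x => PySem.List.pyGetD (pvSplitSlash x) (-((k : Int) + 1)) "") =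
            (fun r => PySem.List.pyGetD (pvSplitSlash r).reverse ((k : Int)) "") := by
          funext r
          exact pv_pyGetD_neg_succ_reverse (pvSplitSlash r) k ""
        rw [hkey]

-- ===== VERDICT (by name: the statement is the Claim_ definition above) =====
theorem sort_results_by_header_and_last_unique_component_spec : Claim_equal_sort_results_by_header_and_last_unique_component := by
  intro results headers _
  unfold Spec_sort_results_by_header_and_last_unique_component
  unfold sort_results_by_header_and_last_unique_component
  unfold sort_results_by_header_and_last_unique_component_alt
  have hstep : pvStepA results = pvStepB results :=
    funext fun acc => funext fun header => pv_step_eq results acc header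
  rw [hstep]
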